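-- pv_equiv track=rewrite | github.com/pypi-data/pypi-mirror-57 | packages/freckles_adapter_nsbl/freckles_adapter_nsbl-1.0.0.tar.gz/freckles_adapter_nsbl-1.0.0/src/freckles_adapter_nsbl/external/nsbl-plugins/filter_plugins/freckles_filters.py | platform_var_filter
-- ===== SOURCE A (Python) =====
-- def platform_var_filter(
--     default_vars, platform_matchers, ignore_case=True, default_value=False
-- ):
--     """Computes the first matching variable out of a dict of variables (key: platform, value: var).
--     """
--
--     for platform in platform_matchers:
--
--         if ignore_case:
--             platform = platform.lower()
--
--         for key, value in default_vars.items():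
--             if ignore_case:
--                 key = key.lower()
--             if key == platform:
--                 return value
--
--     return default_value
-- ===== SOURCE B (Python) =====
-- def platform_var_filter(
--     default_vars, platform_matchers, ignore_case=True, default_value=False
-- ):
--     # Inverted loop nesting: rank each matcher once, then a single argmin pass
--     # over the variables keeps the first variable matching the earliest-ranked matcher.
--     rank = {}
--     for i, p in enumerate(platform_matchers):
--         k = p.lower() if ignore_case else p
--         if k not in rank:
--             rank[k] = i
--     best = None
--     for key, value in default_vars.items():
--         r = rank.get(key.lower() if ignore_case else key)
--         if r is not None and (best is None or r < best[0]):
--             best = (r, value)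
--     return best[1] if best is not None else default_value
-- ===== Notes on version B (the rewrite author's own statement) =====
-- stated objective: alternative
-- what changed: Inverts the loop nesting: matchers are ranked once into a dictionary, then a single argmin pass over the variables keeps the first variable with the smallest matcher rank, instead of rescanning all variables for every matcher; it trades A's early exit for a fixed two-pass O(P+K) shape.
import Mathlib
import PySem

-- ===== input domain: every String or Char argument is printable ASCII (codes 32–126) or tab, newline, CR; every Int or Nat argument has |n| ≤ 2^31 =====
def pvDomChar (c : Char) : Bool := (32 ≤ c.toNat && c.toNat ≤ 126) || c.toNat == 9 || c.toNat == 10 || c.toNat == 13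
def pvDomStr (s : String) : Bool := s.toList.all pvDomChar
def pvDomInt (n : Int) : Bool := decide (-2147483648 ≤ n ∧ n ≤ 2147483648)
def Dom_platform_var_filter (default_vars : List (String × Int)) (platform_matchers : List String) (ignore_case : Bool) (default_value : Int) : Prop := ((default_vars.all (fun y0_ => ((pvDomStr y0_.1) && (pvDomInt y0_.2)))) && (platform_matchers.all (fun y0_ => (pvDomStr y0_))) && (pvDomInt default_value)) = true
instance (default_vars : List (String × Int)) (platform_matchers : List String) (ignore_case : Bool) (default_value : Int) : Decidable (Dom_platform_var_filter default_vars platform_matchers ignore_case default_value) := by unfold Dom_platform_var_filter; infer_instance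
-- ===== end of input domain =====

-- B inverts A's loop nesting: it ranks each matcher once, then a single argmin pass over
-- the variables keeps the first variable with the smallest matcher rank (objective: alternative).

-- key normalization shared by both Pythons: `x.lower() if ignore_case else x`
def pvNorm (ignore_case : Bool) (s : String) : String :=
  if ignore_case then PySem.Str.lower s else s

-- ===== PORT A =====
-- inner loop of A: scan default_vars.items() for the first key whose normalized form equals platform
def pvAinner (ignore_case : Bool) (platform : String) : List (String × Int) → Option Int
  | [] => none
  | (key, value) :: rest =>
      if pvNorm ignore_case key = platform then some value
      else pvAinner ignore_case platform rest

-- outer loop of A: over platform_matchers, normalizing the matcher first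
def pvAouter (default_vars : List (String × Int)) (ignore_case : Bool) : List String → Option Int
  | [] => none
  | pl :: rest =>
      match pvAinner ignore_case (pvNorm ignore_case pl) default_vars with
      | some v => some v
      | none => pvAouter default_vars ignore_case rest

def platform_var_filter (default_vars : List (String × Int)) (platform_matchers : List String) (ignore_case : Bool) (default_value : Int) : Int :=
  match pvAouter default_vars ignore_case platform_matchers with
  | some v => v
  | none => default_value

-- ===== PORT B =====
-- first loop of B: rank each (normalized) matcher by its first position (enumerate)
def pvBuildRank (ignore_case : Bool) : List String → Nat → PySem.Dict String Nat → PySem.Dict String Nat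
  | [], _, d => d
  | p :: rest, i, d =>
      let k := pvNorm ignore_case p
      pvBuildRank ignore_case rest (i + 1) (if d.contains k then d else d.insert k i)

-- second loop of B: argmin pass over the variables, `best` is (rank, value)
def pvScan (d : PySem.Dict String Nat) (ignore_case : Bool) : List (String × Int) → Option (Nat × Int) → Option (Nat × Int)
  | [], best => best
  | (key, value) :: rest, best =>
      let best' :=
        match d.get? (pvNorm ignore_case key), best with
        | none, _ => best
        | some r, none => some (r, value)
        | some r, some (br, bv) => if r < br then some (r, value) else some (br, bv)
      pvScan d ignore_case rest best'

def platform_var_filter_alt (default_vars : List (String × Int)) (platform_matchers : List String) (ignore_case : Bool) (default_value : Int) : Int :=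
  match pvScan (pvBuildRank ignore_case platform_matchers 0 PySem.Dict.empty) ignore_case default_vars none with
  | some (_, v) => v
  | none => default_value

-- ===== PRECONDITION & SPEC =====
def Spec_platform_var_filter (default_vars : List (String × Int)) (platform_matchers : List String) (ignore_case : Bool) (default_value : Int) (out : Int) : Prop := out = platform_var_filter_alt default_vars platform_matchers ignore_case default_value
instance (default_vars : List (String × Int)) (platform_matchers : List String) (ignore_case : Bool) (default_value : Int) (out : Int) : Decidable (Spec_platform_var_filter default_vars platform_matchers ignore_case default_value out) := by unfold Spec_platform_var_filter; infer_instance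

-- ===== CLAIM (what is proved, stated in full; the proofs are below) =====
def Claim_equal_platform_var_filter : Prop := ∀ (default_vars : List (String × Int)) (platform_matchers : List String) (ignore_case : Bool) (default_value : Int), Dom_platform_var_filter default_vars platform_matchers ignore_case default_value → Spec_platform_var_filter default_vars platform_matchers ignore_case default_value (platform_var_filter default_vars platform_matchers ignore_case default_value)

-- ===== LEMMAS AND PROOFS =====

-- rank of a normalized key among the matchers: position of the first matcher normalizing to it
def pvRankOf (ignore_case : Bool) : List String → String → Option Nat
  | [], _ => none
  | p :: rest, k =>
      if pvNorm ignore_case p = k then some 0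
      else (pvRankOf ignore_case rest k).map (· + 1)

-- the rank dictionary answers exactly pvRankOf (shifted by the start index, behind the accumulator)
theorem pvBuildRank_get? (ic : Bool) (pms : List String) (i : Nat)
    (d : PySem.Dict String Nat) (k : String) :
    (pvBuildRank ic pms i d).get? k =
      match d.get? k with
      | some j => some j
      | none => (pvRankOf ic pms k).map (· + i) := by
  induction pms generalizing i d with
  | nil => cases h : d.get? k <;> simp [pvBuildRank, pvRankOf, h]
  | cons p rest ih =>
    simp only [pvBuildRank, pvRankOf]
    rw [ih]
    by_cases hk : pvNorm ic p = k
    · subst hk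
      cases hc : d.contains (pvNorm ic p) with
      | true =>
        have h2 := PySem.Dict.contains_eq_isSome_get? (d := d) (k := pvNorm ic p)
        rw [hc] at h2
        cases hg : d.get? (pvNorm ic p) with
        | none => rw [hg] at h2; simp at h2
        | some w => simp [hc, hg]
      | false =>
        have h2 := PySem.Dict.contains_eq_isSome_get? (d := d) (k := pvNorm ic p)
        rw [hc] at h2
        cases hg : d.get? (pvNorm ic p) with
        | some w => rw [hg] at h2; simp at h2
        | none => simp [hc, hg, PySem.Dict.get?_insert_self]
    · have hgp : ∀ v, (d.insert (pvNorm ic p) v).get? k = d.get? k :=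
        fun v => PySem.Dict.get?_insert_of_ne d v (fun h => hk h.symm)
      cases hc : d.contains (pvNorm ic p) <;> cases hh : d.get? k <;>
        simp [hc, hh, hgp, hk, Option.map_map] <;>
        (cases hr : pvRankOf ic rest k <;> simp [hr]; omega)

-- generic argmin scan over an abstract rank function (key ↦ rank of its normalized form)
def pvScanF (r : String → Option Nat) : List (String × Int) → Option (Nat × Int) → Option (Nat × Int)
  | [], best => best
  | (key, value) :: rest, best =>
      let best' :=
        match r key, best with
        | none, _ => best
        | some j, none => some (j, value)
        | some j, some (br, bv) => if j < br then some (j, value) else some (br, bv)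
      pvScanF r rest best'

theorem pvScan_eq_pvScanF (ic : Bool) (pms : List String) (dv : List (String × Int))
    (best : Option (Nat × Int)) :
    pvScan (pvBuildRank ic pms 0 PySem.Dict.empty) ic dv best =
      pvScanF (fun key => pvRankOf ic pms (pvNorm ic key)) dv best := by
  induction dv generalizing best with
  | nil => rfl
  | cons kv rest ih =>
    obtain ⟨key, value⟩ := kv
    simp only [pvScan, pvScanF, pvBuildRank_get?, PySem.Dict.get?_empty]
    rw [ih]
    cases h : pvRankOf ic pms (pvNorm ic key) <;> simp [h]

-- once the best pair has rank 0, the scan never changes it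
theorem pvScanF_zero_fixed (r : String → Option Nat) (dv : List (String × Int)) (v : Int) :
    pvScanF r dv (some (0, v)) = some (0, v) := by
  induction dv with
  | nil => rfl
  | cons kv rest ih =>
    obtain ⟨key, value⟩ := kv
    simp only [pvScanF]
    cases h : r key <;> simp [h, ih]

-- first variable whose key has rank 0
def pvFirstZero (r : String → Option Nat) : List (String × Int) → Option Int
  | [] => none
  | (key, value) :: rest =>
      if r key = some 0 then some value else pvFirstZero r rest

-- if a rank-0 variable exists, the scan returns the first one (from any positive-rank start)
theorem pvScanF_of_firstZero (r : String → Option Nat) (dv : List (String × Int)) (v : Int) :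
    ∀ best : Option (Nat × Int), (∀ br bv, best = some (br, bv) → 0 < br) →
    pvFirstZero r dv = some v → pvScanF r dv best = some (0, v) := by
  induction dv with
  | nil => intro best _ h; simp [pvFirstZero] at h
  | cons kv rest ih =>
    obtain ⟨key, value⟩ := kv
    intro best hpos hfz
    simp only [pvFirstZero] at hfz
    simp only [pvScanF]
    by_cases h0 : r key = some 0
    · simp [h0] at hfz
      subst hfz
      cases best with
      | none => simp [h0, pvScanF_zero_fixed]
      | some b =>
        obtain ⟨br, bv⟩ := b
        have := hpos br bv rfl
        simp [h0, this, pvScanF_zero_fixed]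
    · simp [h0] at hfz
      cases h : r key with
      | none => exact ih _ hpos hfz
      | some j =>
        have hj : 0 < j := by
          rcases Nat.eq_zero_or_pos j with hz | hp
          · exact absurd (hz ▸ h) h0
          · exact hp
        cases best with
        | none =>
          exact ih _ (by intro a c hb; simp at hb; omega) hfz
        | some b =>
          obtain ⟨br, bv⟩ := b
          have hbr := hpos br bv rfl
          by_cases hlt : j < br
          · simp only [hlt, if_pos]
            exact ih _ (by intro a c hb; simp at hb; omega) hfz
          · simp only [hlt, if_neg, not_false_iff]
            exact ih _ (by intro a c hb; simp at hb; omega) hfz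

-- if no key has a rank, the scan returns its accumulator
theorem pvScanF_none (r : String → Option Nat) (dv : List (String × Int))
    (h : ∀ kv ∈ dv, r kv.1 = none) (best : Option (Nat × Int)) :
    pvScanF r dv best = best := by
  induction dv generalizing best with
  | nil => rfl
  | cons kv rest ih =>
    obtain ⟨key, value⟩ := kv
    have hk : r key = none := h (key, value) (List.mem_cons_self)
    simp only [pvScanF, hk]
    exact ih (fun x hx => h x (List.mem_cons_of_mem _ hx)) best

-- shifting every rank by +1 shifts the scan result's rank by +1 (values unchanged)
theorem pvScanF_shift (r r' : String → Option Nat) (dv : List (String × Int))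
    (h : ∀ kv ∈ dv, r' kv.1 = (r kv.1).map (· + 1)) (best : Option (Nat × Int)) :
    pvScanF r' dv (best.map (fun p => (p.1 + 1, p.2))) =
      (pvScanF r dv best).map (fun p => (p.1 + 1, p.2)) := by
  induction dv generalizing best with
  | nil => rfl
  | cons kv rest ih =>
    obtain ⟨key, value⟩ := kv
    have hk : r' key = (r key).map (· + 1) := h (key, value) (List.mem_cons_self)
    have htail : ∀ kv ∈ rest, r' kv.1 = (r kv.1).map (· + 1) :=
      fun x hx => h x (List.mem_cons_of_mem _ hx)
    simp only [pvScanF, hk]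
    cases hr : r key with
    | none => simp only [Option.map_none]; exact ih htail best
    | some j =>
      cases best with
      | none => simp only [Option.map_some, Option.map_none]; exact ih htail (some (j, value))
      | some b =>
        obtain ⟨br, bv⟩ := b
        simp only [Option.map_some]
        by_cases hlt : j < br
        · have : j + 1 < br + 1 := by omega
          simp only [hlt, this, if_pos]
          exact ih htail (some (j, value))
        · have : ¬ (j + 1 < br + 1) := by omega
          simp only [hlt, this, if_neg, not_false_iff]
          exact ih htail (some (br, bv))

-- the first rank-0 variable for matchers (p :: _) is A's inner scan for p
theorem pvFirstZero_eq_pvAinner (ic : Bool) (p : String) (rest : List String)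
    (dv : List (String × Int)) :
    pvFirstZero (fun key => pvRankOf ic (p :: rest) (pvNorm ic key)) dv =
      pvAinner ic (pvNorm ic p) dv := by
  induction dv with
  | nil => rfl
  | cons kv tail ih =>
    obtain ⟨key, value⟩ := kv
    have hiff : (pvRankOf ic (p :: rest) (pvNorm ic key) = some 0) ↔ pvNorm ic key = pvNorm ic p := by
      simp only [pvRankOf]
      by_cases hk : pvNorm ic p = pvNorm ic key
      · simp [hk, eq_comm]
      · have hne : ¬ pvNorm ic key = pvNorm ic p := fun hx => hk hx.symm
        rw [if_neg hk]
        cases h : pvRankOf ic rest (pvNorm ic key) <;> simp [hne]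
    simp only [pvFirstZero, pvAinner]
    by_cases hk : pvNorm ic key = pvNorm ic p
    · rw [if_pos (hiff.mpr hk), if_pos hk]
    · rw [if_neg (fun hx => hk (hiff.mp hx)), if_neg hk, ih]

-- if A's inner scan finds nothing for p, no variable's key normalizes to p
theorem pvAinner_none (ic : Bool) (p : String) (dv : List (String × Int))
    (h : pvAinner ic p dv = none) : ∀ kv ∈ dv, pvNorm ic kv.1 ≠ p := by
  induction dv with
  | nil => intro kv hkv; simp at hkv
  | cons kv0 rest ih =>
    obtain ⟨key, value⟩ := kv0
    intro kv hkv
    simp only [pvAinner] at h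
    by_cases hk : pvNorm ic key = p
    · simp [hk] at h
    · rcases List.mem_cons.mp hkv with h1 | h1
      · subst h1; exact hk
      · exact ih (by simpa [hk] using h) kv h1

-- main correspondence: the argmin pass equals A's nested scan
theorem pvScanF_eq_pvAouter (ic : Bool) (dv : List (String × Int)) (pms : List String) :
    (pvScanF (fun key => pvRankOf ic pms (pvNorm ic key)) dv none).map Prod.snd =
      pvAouter dv ic pms := by
  induction pms with
  | nil =>
    rw [pvScanF_none _ _ (fun kv _ => rfl)]
    rfl
  | cons p rest ih =>
    simp only [pvAouter]
    cases h : pvAinner ic (pvNorm ic p) dv with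
    | some v =>
      have hfz : pvFirstZero (fun key => pvRankOf ic (p :: rest) (pvNorm ic key)) dv = some v := by
        rw [pvFirstZero_eq_pvAinner]; exact h
      rw [pvScanF_of_firstZero _ _ _ none (by intro br bv hb; simp at hb) hfz]
      rfl
    | none =>
      have hno := pvAinner_none ic (pvNorm ic p) dv h
      have hsh : ∀ kv ∈ dv, (fun key => pvRankOf ic (p :: rest) (pvNorm ic key)) kv.1 =
          ((fun key => pvRankOf ic rest (pvNorm ic key)) kv.1).map (· + 1) := by
        intro kv hkv
        simp only [pvRankOf]
        rw [if_neg (fun hx => hno kv hkv hx.symm)]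
      have := pvScanF_shift (fun key => pvRankOf ic rest (pvNorm ic key))
        (fun key => pvRankOf ic (p :: rest) (pvNorm ic key)) dv hsh none
      simp only [Option.map_none] at this
      rw [this, ← ih, Option.map_map]
      rfl

-- ===== VERDICT (by name: the statement is the Claim_ definition above) =====
theorem platform_var_filter_spec : Claim_equal_platform_var_filter := by
  intro dv pms ic dval _
  unfold Spec_platform_var_filter platform_var_filter platform_var_filter_alt
  rw [pvScan_eq_pvScanF]
  have h := pvScanF_eq_pvAouter ic dv pms
  cases hs : pvScanF (fun key => pvRankOf ic pms (pvNorm ic key)) dv none with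
  | none => rw [hs] at h; simp at h; rw [← h]
  | some b =>
    obtain ⟨br, bv⟩ := b
    rw [hs] at h; simp at h; rw [← h]
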